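-- pv_equiv track=rewrite | github.com/CatFreefall/Chess | src/DrawMoves.py | get_move_tile_index
-- ===== SOURCE A (Python) =====
-- def get_move_tile_index(current_move, current_index_x, current_index_y):
--   current_move_set = current_move.split("_")
--
--   for k in current_move_set:
--     match k:
--       case "up":
--         current_index_y = current_index_y - 1
--       case "left":
--         current_index_x = current_index_x + 1
--       case "down":
--         current_index_y = current_index_y + 1
--       case "right":
--         current_index_x = current_index_x - 1
--
--   return [current_index_x, current_index_y]
-- ===== SOURCE B (Python) =====
-- def get_move_tile_index(current_move, current_index_x, current_index_y):
--   moves = current_move.split("_")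
--   return [current_index_x + moves.count("left") - moves.count("right"),
--           current_index_y + moves.count("down") - moves.count("up")]
-- ===== Notes on version B (the rewrite author's own statement) =====
-- stated objective: simpler
-- what changed: Replaces the sequential match-dispatch accumulator loop by a closed-form count-then-combine: each coordinate is the start value plus/minus the counts of the relevant direction tokens.
import Mathlib
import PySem

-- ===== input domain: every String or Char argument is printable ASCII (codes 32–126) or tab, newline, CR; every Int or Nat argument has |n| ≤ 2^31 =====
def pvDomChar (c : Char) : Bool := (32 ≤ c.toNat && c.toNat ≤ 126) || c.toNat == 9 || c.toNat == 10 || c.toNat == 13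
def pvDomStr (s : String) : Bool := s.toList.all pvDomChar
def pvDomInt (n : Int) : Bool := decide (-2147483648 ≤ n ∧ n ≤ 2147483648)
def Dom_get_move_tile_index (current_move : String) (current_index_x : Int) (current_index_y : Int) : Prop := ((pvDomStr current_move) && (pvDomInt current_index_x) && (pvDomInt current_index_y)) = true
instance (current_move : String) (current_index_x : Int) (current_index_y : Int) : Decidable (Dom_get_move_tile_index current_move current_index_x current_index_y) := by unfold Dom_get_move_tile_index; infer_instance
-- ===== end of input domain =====

-- ===== PORT A =====
-- B changes nothing behaviourally: it computes each coordinate from token counts instead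
-- of a sequential match-dispatch accumulator loop (objective: simpler).
def get_move_tile_index (current_move : String) (current_index_x : Int) (current_index_y : Int) : List Int :=
  let current_move_set := (PySem.Str.split? current_move "_").getD []  -- sep "_" ≠ "": split? is always some; exact Python split
  let (cx, cy) := current_move_set.foldl (fun (st : Int × Int) k =>
    match k with
    | "up" => (st.1, st.2 - 1)
    | "left" => (st.1 + 1, st.2)
    | "down" => (st.1, st.2 + 1)
    | "right" => (st.1 - 1, st.2)
    | _ => st) (current_index_x, current_index_y)
  [cx, cy]

-- ===== PORT B =====
def get_move_tile_index_alt (current_move : String) (current_index_x : Int) (current_index_y : Int) : List Int :=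
  let moves := (PySem.Str.split? current_move "_").getD []  -- sep "_" ≠ "": split? is always some; exact Python split
  [current_index_x + PySem.List.count moves "left" - PySem.List.count moves "right",
   current_index_y + PySem.List.count moves "down" - PySem.List.count moves "up"]

-- ===== PRECONDITION & SPEC =====
def Spec_get_move_tile_index (current_move : String) (current_index_x : Int) (current_index_y : Int) (out : List Int) : Prop := out = get_move_tile_index_alt current_move current_index_x current_index_y
instance (current_move : String) (current_index_x : Int) (current_index_y : Int) (out : List Int) : Decidable (Spec_get_move_tile_index current_move current_index_x current_index_y out) := by unfold Spec_get_move_tile_index; infer_instance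

-- ===== CLAIM (what is proved, stated in full; the proofs are below) =====
def Claim_equal_get_move_tile_index : Prop := ∀ (current_move : String) (current_index_x : Int) (current_index_y : Int), Dom_get_move_tile_index current_move current_index_x current_index_y → Spec_get_move_tile_index current_move current_index_x current_index_y (get_move_tile_index current_move current_index_x current_index_y)

-- ===== LEMMAS AND PROOFS =====

theorem fold_counts (l : List String) (x y : Int) :
    l.foldl (fun (st : Int × Int) k =>
      match k with
      | "up" => (st.1, st.2 - 1)
      | "left" => (st.1 + 1, st.2)
      | "down" => (st.1, st.2 + 1)
      | "right" => (st.1 - 1, st.2)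
      | _ => st) (x, y)
    = (x + PySem.List.count l "left" - PySem.List.count l "right",
       y + PySem.List.count l "down" - PySem.List.count l "up") := by
  induction l generalizing x y with
  | nil => simp [PySem.List.count]
  | cons h t ih =>
    simp only [List.foldl_cons]
    by_cases h1 : h = "up" <;> by_cases h2 : h = "left" <;> by_cases h3 : h = "down" <;>
      by_cases h4 : h = "right" <;>
      simp_all [PySem.List.count] <;> ring_nf

-- ===== VERDICT (by name: the statement is the Claim_ definition above) =====
theorem get_move_tile_index_spec : Claim_equal_get_move_tile_index := by
  intro m x y _
  unfold Spec_get_move_tile_index get_move_tile_index get_move_tile_index_alt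
  simp only [fold_counts]
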